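-- pv_equiv track=rewrite | github.com/AP-MI-2021/lab-3-dariussandru | main.py | get_longest_digit_count_desc
-- ===== SOURCE A (Python) =====
-- def is_crescator(x):
--     """
--
--     :param x: un numar natural
--     :return: true daca cifrele numarului x sunt in ordine crescatoare si fals in caz contrar
--     """
--     copie = x
--     nr_cifre = 0
--     var = 0
--     while copie > 9:
--         nr_cifre += 1
--         copie //= 10
--     copie = x
--
--     for i in range(copie//10**nr_cifre , copie//10%10+1):
--         for j in range(copie//10**(nr_cifre-1)%10, copie%10+1):
--             if(i<j):
--                 var+=1
--     if var >= nr_cifre: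
--         return True
--     else:
--         return False
--
-- def get_longest_digit_count_desc(lista_principala):
--     """
--
--        :param lista_principala:
--        :return: cea mai lunga subsecventa de numere cu prop ca cifrele numerelor sunt in oridine crescatoare
--        """
--     lungime_max = 0
--     lungime_actuala = 0
--     secventa_max = []
--     secventa_actuala = []
--     for x in lista_principala:
--         if is_crescator(x):
--             lungime_actuala += 1
--             secventa_actuala.append(x)
--         else:
--             if lungime_actuala > lungime_max:
--                 lungime_max = lungime_actuala
--                 secventa_max = secventa_actuala
--
--             lungime_actuala = 0
--             secventa_actuala = []
--
--     if lungime_actuala > lungime_max: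
--         secventa_max = secventa_actuala
--
--     return secventa_max
-- ===== SOURCE B (Python) =====
-- def is_crescator(x):
--     copie = x
--     nr_cifre = 0
--     var = 0
--     while copie > 9:
--         nr_cifre += 1
--         copie //= 10
--     copie = x
--     for i in range(copie//10**nr_cifre, copie//10%10+1):
--         for j in range(copie//10**(nr_cifre-1)%10, copie%10+1):
--             if i < j:
--                 var += 1
--     return var >= nr_cifre
--
-- def get_longest_digit_count_desc(lista_principala):
--     # phase 1: split the list into its maximal runs of passing elements
--     runs = []
--     cur = []
--     for x in lista_principala:
--         if is_crescator(x):
--             cur.append(x)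
--         elif cur:
--             runs.append(cur)
--             cur = []
--     if cur:
--         runs.append(cur)
--     # phase 2: pick the first longest run
--     best = []
--     for r in runs:
--         if len(best) < len(r):
--             best = r
--     return best
-- ===== Notes on version B (the rewrite author's own statement) =====
-- stated objective: alternative
-- what changed: B splits the list into all maximal runs of passing elements first and then selects the first longest run, instead of A's single pass maintaining an inline running maximum with separate length counters; Pre_ excludes lists containing a non-positive element, on which is_crescator raises TypeError (10**-1 is a float fed to range), so A returns on every Pre_ input.
import Mathlib
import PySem

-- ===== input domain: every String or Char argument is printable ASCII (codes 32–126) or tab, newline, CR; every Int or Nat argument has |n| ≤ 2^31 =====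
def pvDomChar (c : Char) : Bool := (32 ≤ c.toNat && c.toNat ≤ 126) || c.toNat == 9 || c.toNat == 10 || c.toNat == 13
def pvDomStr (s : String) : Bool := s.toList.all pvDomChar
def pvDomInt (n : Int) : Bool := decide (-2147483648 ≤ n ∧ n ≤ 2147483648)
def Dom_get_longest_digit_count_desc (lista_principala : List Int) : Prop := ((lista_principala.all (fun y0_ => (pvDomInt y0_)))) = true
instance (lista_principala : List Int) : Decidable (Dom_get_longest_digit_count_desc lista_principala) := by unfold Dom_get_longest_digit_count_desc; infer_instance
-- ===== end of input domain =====

-- B re-decomposes A's inline running-maximum scan into two phases (collect all maximal runs, then pick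
-- the first longest); same cost, proved equal on lists of positive ints (A raises TypeError otherwise).

-- ===== PORT A =====
-- helper is_crescator, shared verbatim by A and Source B (Source B copies it unchanged)
def pvNrCifre (copie : Int) (acc : Int) : Int :=
  if 9 < copie then pvNrCifre (PySem.Int.floordiv copie 10) (acc + 1) else acc
termination_by copie.toNat
decreasing_by
  rw [PySem.Int.floordiv_eq_ediv_of_pos (by omega)]
  omega

def is_crescator (x : Int) : Bool :=
  let nr := pvNrCifre x 0
  -- when nr = 0, Python's 10**(nr_cifre-1) is the float 0.1; inside Pre_ (x ≥ 1) the outer range is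
  -- then empty and the inner bound is never used, so the clamped exponent (nr-1).toNat is never read
  let b1 := PySem.Int.mod (PySem.Int.floordiv x (10 ^ (nr - 1).toNat)) 10
  let b2 := PySem.Int.mod x 10
  let var :=
    (PySem.List.pyRange (PySem.Int.floordiv x (10 ^ nr.toNat))
        (PySem.Int.mod (PySem.Int.floordiv x 10) 10 + 1) 1).foldl
      (fun v i =>
        (PySem.List.pyRange b1 (b2 + 1) 1).foldl
          (fun v' j => if i < j then v' + 1 else v') v)
      0
  decide (var ≥ nr)

def pvStepA (st : Int × Int × List Int × List Int) (x : Int) : Int × Int × List Int × List Int :=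
  match st with
  | (lmax, lact, smax, sact) =>
    if is_crescator x then (lmax, lact + 1, smax, sact ++ [x])
    else if lact > lmax then (lact, 0, sact, ([] : List Int))
    else (lmax, 0, smax, ([] : List Int))

def get_longest_digit_count_desc (lista_principala : List Int) : List Int :=
  let s := lista_principala.foldl pvStepA (0, 0, ([] : List Int), ([] : List Int))
  if s.2.1 > s.1 then s.2.2.2 else s.2.2.1

-- ===== PORT B =====
def pvStepB (st : List (List Int) × List Int) (x : Int) : List (List Int) × List Int :=
  if is_crescator x then (st.1, st.2 ++ [x])
  else if st.2 ≠ [] then (st.1 ++ [st.2], ([] : List Int))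
  else st

def pvPick (best r : List Int) : List Int := if best.length < r.length then r else best

def get_longest_digit_count_desc_alt (lista_principala : List Int) : List Int :=
  let p := lista_principala.foldl pvStepB (([] : List (List Int)), ([] : List Int))
  let runs := if p.2 ≠ [] then p.1 ++ [p.2] else p.1
  runs.foldl pvPick []

-- ===== PRECONDITION & SPEC =====
-- Pre_ excludes lists with a non-positive element: there is_crescator evaluates 10**(-1) to a float
-- and feeds it to range, so A raises TypeError and returns nothing.
def Pre_get_longest_digit_count_desc (lista_principala : List Int) : Prop :=
  ∀ x ∈ lista_principala, 1 ≤ x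
instance (lista_principala : List Int) : Decidable (Pre_get_longest_digit_count_desc lista_principala) := by
  unfold Pre_get_longest_digit_count_desc; infer_instance

def pvWitness_get_longest_digit_count_desc : List Int := [12, 5, 21, 13, 19]

def Spec_get_longest_digit_count_desc (lista_principala : List Int) (out : List Int) : Prop := out = get_longest_digit_count_desc_alt lista_principala
instance (lista_principala : List Int) (out : List Int) : Decidable (Spec_get_longest_digit_count_desc lista_principala out) := by unfold Spec_get_longest_digit_count_desc; infer_instance

-- ===== CLAIM (what is proved, stated in full; the proofs are below) =====
def Claim_equal_get_longest_digit_count_desc : Prop := ∀ (lista_principala : List Int), Dom_get_longest_digit_count_desc lista_principala → Pre_get_longest_digit_count_desc lista_principala → Spec_get_longest_digit_count_desc lista_principala (get_longest_digit_count_desc lista_principala)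

-- ===== LEMMAS AND PROOFS =====

-- the runs still to be produced by B's first phase, given that `sact` is the pending current run
def pvRunsPending : List Int → List Int → List (List Int)
  | [], sact => if sact ≠ [] then [sact] else []
  | x :: xs, sact =>
    if is_crescator x then pvRunsPending xs (sact ++ [x])
    else if sact ≠ [] then sact :: pvRunsPending xs [] else pvRunsPending xs []

lemma pvRunsB (l : List Int) : ∀ (rs : List (List Int)) (cur : List Int),
    (if (l.foldl pvStepB (rs, cur)).2 ≠ [] then
        (l.foldl pvStepB (rs, cur)).1 ++ [(l.foldl pvStepB (rs, cur)).2]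
      else (l.foldl pvStepB (rs, cur)).1)
    = rs ++ pvRunsPending l cur := by
  induction l with
  | nil =>
    intro rs cur
    by_cases h : cur = [] <;> simp [pvRunsPending, h]
  | cons x xs ih =>
    intro rs cur
    by_cases hc : is_crescator x
    · simpa [pvStepB, hc, pvRunsPending] using ih rs (cur ++ [x])
    · by_cases h : cur = []
      · simpa [pvStepB, hc, h, pvRunsPending] using ih rs []
      · simpa [pvStepB, hc, h, pvRunsPending] using ih (rs ++ [cur]) []

lemma pvMain (l : List Int) : ∀ (smax sact : List Int),
    (if (l.foldl pvStepA ((smax.length : Int), (sact.length : Int), smax, sact)).2.1 >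
        (l.foldl pvStepA ((smax.length : Int), (sact.length : Int), smax, sact)).1 then
        (l.foldl pvStepA ((smax.length : Int), (sact.length : Int), smax, sact)).2.2.2
      else (l.foldl pvStepA ((smax.length : Int), (sact.length : Int), smax, sact)).2.2.1)
    = List.foldl pvPick smax (pvRunsPending l sact) := by
  induction l with
  | nil =>
    intro smax sact
    by_cases h : sact = []
    · simp [pvRunsPending, h]
    · by_cases hl : smax.length < sact.length
      · have hgt : ((sact.length : Int) > (smax.length : Int)) := by exact_mod_cast hl
        simp [pvRunsPending, h, pvPick, hl, hgt]
      · have hgt : ¬ ((sact.length : Int) > (smax.length : Int)) := by exact_mod_cast hl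
        simp [pvRunsPending, h, pvPick, hl, hgt]
  | cons x xs ih =>
    intro smax sact
    by_cases hc : is_crescator x
    · have hcast : (sact.length : Int) + 1 = ((sact ++ [x]).length : Int) := by
        push_cast [List.length_append, List.length_singleton]; omega
      have := ih smax (sact ++ [x])
      rw [← hcast] at this
      simpa [pvStepA, hc, pvRunsPending] using this
    · by_cases hl : smax.length < sact.length
      · have hgt : ((sact.length : Int) > (smax.length : Int)) := by exact_mod_cast hl
        have hne : sact ≠ [] := by
          intro h; subst h; simp at hl
        have hih := ih sact []
        simp only [List.length_nil, Int.natCast_zero] at hih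
        calc
          _ = List.foldl pvPick sact (pvRunsPending xs []) := by
                simpa [pvStepA, hc, hgt] using hih
          _ = _ := by simp [pvRunsPending, hc, hne, pvPick, hl]
      · have hgt : ¬ ((sact.length : Int) > (smax.length : Int)) := by exact_mod_cast hl
        have hih := ih smax []
        simp only [List.length_nil, Int.natCast_zero] at hih
        calc
          _ = List.foldl pvPick smax (pvRunsPending xs []) := by
                simpa [pvStepA, hc, hgt] using hih
          _ = _ := by
                by_cases h : sact = [] <;> simp [pvRunsPending, hc, h, pvPick, hl]

-- ===== VERDICT (by name: the statement is the Claim_ definition above) =====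
theorem get_longest_digit_count_desc_spec : Claim_equal_get_longest_digit_count_desc := by
  intro l _dom _pre
  unfold Spec_get_longest_digit_count_desc
  unfold get_longest_digit_count_desc get_longest_digit_count_desc_alt
  have hA := pvMain l [] []
  have hB := pvRunsB l [] []
  simp only [List.length_nil, Int.natCast_zero] at hA
  simp only [List.nil_append] at hB
  rw [hA, ← hB]
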